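-- pv_equiv track=rewrite | github.com/Gsllchb/code-jam-solutions | src/product_triplets.py | solve
-- ===== SOURCE A (Python) =====
-- from bisect import bisect_left, bisect_right
--
-- def solve(A) -> int:
--     length = len(A)
--     A.sort()
--     numZero = bisect_right(A, 0)
--     total = foo2(numZero) * (len(A) - numZero) + foo3(numZero)
--     for i in range(numZero, length - 2):
--         for j in range(i + 1, length - 1):
--             product = A[i] * A[j]
--             left = bisect_left(A, product, lo=j + 1)
--             right = bisect_right(A, product, lo=j + 1)
--             total += right - left
--     return total
--
-- def foo2(n):
--     return n * (n - 1) // 2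
--
-- def foo3(n):
--     return n * (n - 1) * (n - 2) // (2 * 3)
-- ===== SOURCE B (Python) =====
-- def solve(A) -> int:
--     # Same in-place sort of A as the original, then a descending sweep over j with a
--     # dict of suffix value-counts replacing the per-pair bisect calls.
--     A.sort()
--     n = len(A)
--     nz = 0
--     for x in A:
--         if x <= 0:
--             nz += 1
--     total = nz * (nz - 1) // 2 * (n - nz) + nz * (nz - 1) * (nz - 2) // 6
--     cnt = {}
--     for j in range(n - 2, nz, -1):
--         cnt[A[j + 1]] = cnt.get(A[j + 1], 0) + 1
--         aj = A[j]
--         for i in range(nz, j):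
--             total += cnt.get(A[i] * aj, 0)
--     return total
-- ===== Notes on version B (the rewrite author's own statement) =====
-- stated objective: alternative
-- what changed: Instead of two bisect binary searches per (i,j) pair inside an ascending double loop, B sweeps j downward once while maintaining a dict of suffix value-counts and looks the product up in it.
import Mathlib
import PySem

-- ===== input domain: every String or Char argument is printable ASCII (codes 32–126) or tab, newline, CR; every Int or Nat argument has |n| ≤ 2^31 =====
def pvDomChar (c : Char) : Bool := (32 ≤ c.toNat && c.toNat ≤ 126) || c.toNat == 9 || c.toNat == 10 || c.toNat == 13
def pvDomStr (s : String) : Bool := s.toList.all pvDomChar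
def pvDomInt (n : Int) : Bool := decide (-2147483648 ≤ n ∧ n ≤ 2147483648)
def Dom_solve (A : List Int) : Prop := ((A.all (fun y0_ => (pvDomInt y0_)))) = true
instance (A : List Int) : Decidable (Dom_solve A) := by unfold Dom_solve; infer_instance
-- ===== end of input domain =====

-- B replaces A's two binary searches per (i,j) pair by one descending sweep that maintains a
-- dict of suffix value-counts and looks each product up in it; return values proved equal, and
-- both Pythons perform the same in-place sort of the argument.


-- ===== PORT A =====
def foo2 (n : Int) : Int := PySem.Int.floordiv (n * (n - 1)) 2

def foo3 (n : Int) : Int := PySem.Int.floordiv (n * (n - 1) * (n - 2)) (2 * 3)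

-- bisect_left/bisect_right with lo = j+1 inspect only A[j+1:]: ported exactly as
-- (j+1) + bisect on the dropped suffix (indices j are nonnegative throughout the loop).
def solve (A : List Int) : Int :=
  let length : Int := PySem.List.len A
  let As := PySem.List.sorted A (fun x => x)
  let numZero : Int := (PySem.List.bisectRight As 0 : Int)
  let total : Int := foo2 numZero * (PySem.List.len As - numZero) + foo3 numZero
  (PySem.List.pyRange numZero (length - 2) 1).foldl (fun total i =>
    (PySem.List.pyRange (i + 1) (length - 1) 1).foldl (fun total j =>
      let product := PySem.List.pyGetD As i 0 * PySem.List.pyGetD As j 0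
      let left : Int := (j + 1) + (PySem.List.bisectLeft (As.drop (j + 1).toNat) product : Int)
      let right : Int := (j + 1) + (PySem.List.bisectRight (As.drop (j + 1).toNat) product : Int)
      total + (right - left)) total) total

-- ===== PORT B =====
def solve_alt (A : List Int) : Int :=
  let As := PySem.List.sorted A (fun x => x)
  let n : Int := PySem.List.len As
  let nz : Int := As.foldl (fun nz x => if x ≤ 0 then nz + 1 else nz) 0
  let total : Int := PySem.Int.floordiv (nz * (nz - 1)) 2 * (n - nz)
                     + PySem.Int.floordiv (nz * (nz - 1) * (nz - 2)) 6
  let st := (PySem.List.pyRange (n - 2) nz (-1)).foldl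
    (fun (st : PySem.Dict Int Int × Int) j =>
      let cnt := st.1.insert (PySem.List.pyGetD As (j + 1) 0)
                             (st.1.getD (PySem.List.pyGetD As (j + 1) 0) 0 + 1)
      let aj := PySem.List.pyGetD As j 0
      let total := (PySem.List.pyRange nz j 1).foldl
        (fun total i => total + cnt.getD (PySem.List.pyGetD As i 0 * aj) 0) st.2
      (cnt, total)) (PySem.Dict.empty, total)
  st.2

-- ===== PRECONDITION & SPEC =====
def Spec_solve (A : List Int) (out : Int) : Prop := out = solve_alt A
instance (A : List Int) (out : Int) : Decidable (Spec_solve A out) := by unfold Spec_solve; infer_instance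

-- ===== CLAIM (what is proved, stated in full; the proofs are below) =====
def Claim_equal_solve : Prop := ∀ (A : List Int), Dom_solve A → Spec_solve A (solve A)

-- ===== LEMMAS AND PROOFS =====

-- proof-only helpers (names, shared shapes)
def pvL (A : List Int) : List Int := PySem.List.sorted A (fun x => x)

def pvC (A : List Int) : ℕ := (pvL A).countP (fun y => decide (y ≤ 0))

def pvF (l : List Int) (i j : ℤ) : ℤ :=
  ((l.drop (j + 1).toNat).count (PySem.List.pyGetD l i 0 * PySem.List.pyGetD l j 0) : ℤ)

def pvBase (A : List Int) : ℤ :=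
  PySem.Int.floordiv ((pvC A : ℤ) * ((pvC A : ℤ) - 1)) 2 * ((A.length : ℤ) - (pvC A : ℤ))
    + PySem.Int.floordiv ((pvC A : ℤ) * ((pvC A : ℤ) - 1) * ((pvC A : ℤ) - 2)) 6

-- in a nondecreasing list, a downward-closed predicate holds exactly on a prefix of countP many entries
lemma pv_countP_iff (p : Int → Bool) (hmono : ∀ y z : Int, z ≤ y → p y = true → p z = true) :
    ∀ (xs : List Int), xs.Pairwise (· ≤ ·) → ∀ (j : ℕ) (hj : j < xs.length),
      (p xs[j] = true ↔ j < xs.countP p) := by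
  intro xs
  induction xs with
  | nil => intro _ j hj; simp at hj
  | cons a t ih =>
    intro hp j hj
    rw [List.pairwise_cons] at hp
    obtain ⟨ha, hpt⟩ := hp
    by_cases hpa : p a = true
    · cases j with
      | zero => simp [hpa]
      | succ m =>
        have hm : m < t.length := by simpa using hj
        have hih := ih hpt m hm
        simp only [List.getElem_cons_succ, List.countP_cons, hpa, if_pos]
        rw [hih]
        omega
    · have ht0 : t.countP p = 0 :=
        List.countP_eq_zero.mpr (fun y hy hpy => hpa (hmono y a (ha y hy) hpy))
      cases j with
      | zero => simp [hpa, ht0]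
      | succ m =>
        have hm : m < t.length := by simpa using hj
        have hne : ¬ p t[m] = true := fun h => hpa (hmono _ a (ha _ (List.getElem_mem hm)) h)
        simp [hpa, ht0, hne]

lemma pv_eq_countP (xs : List Int) (p : Int → Bool) (b : ℕ)
    (hb : b ≤ xs.length)
    (h1 : ∀ (j : ℕ) (hj : j < xs.length), j < b → p xs[j] = true)
    (h2 : ∀ (j : ℕ) (hj : j < xs.length), b ≤ j → ¬ p xs[j] = true)
    (hc : ∀ (j : ℕ) (hj : j < xs.length), (p xs[j] = true ↔ j < xs.countP p)) :
    b = xs.countP p := by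
  have hcl : xs.countP p ≤ xs.length := List.countP_le_length
  rcases Nat.lt_trichotomy b (xs.countP p) with h | h | h
  · have hbl : b < xs.length := lt_of_lt_of_le h hcl
    exact absurd ((hc b hbl).mpr h) (h2 b hbl le_rfl)
  · exact h
  · have hcb : xs.countP p < xs.length := lt_of_lt_of_le h hb
    have := (hc _ hcb).mp (h1 _ hcb h)
    omega

lemma pv_bisectLeft (xs : List Int) (x : Int) (h : xs.Pairwise (· ≤ ·)) :
    PySem.List.bisectLeft xs x = xs.countP (fun y => decide (y < x)) := by
  obtain ⟨hle, hlt, hge⟩ := PySem.List.bisectLeft_spec xs x h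
  refine pv_eq_countP xs _ _ hle ?_ ?_
    (pv_countP_iff (fun y => decide (y < x))
      (by intro y z hzy hy; rw [decide_eq_true_eq] at hy ⊢; omega) xs h)
  · intro j hj hlt'
    simp only [decide_eq_true_eq]
    exact hlt j hj hlt'
  · intro j hj hge'
    have := hge j hj hge'
    simp only [decide_eq_true_eq]
    omega

lemma pv_bisectRight (xs : List Int) (x : Int) (h : xs.Pairwise (· ≤ ·)) :
    PySem.List.bisectRight xs x = xs.countP (fun y => decide (y ≤ x)) := by
  obtain ⟨hle, hlt, hge⟩ := PySem.List.bisectRight_spec xs x h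
  refine pv_eq_countP xs _ _ hle ?_ ?_
    (pv_countP_iff (fun y => decide (y ≤ x))
      (by intro y z hzy hy; rw [decide_eq_true_eq] at hy ⊢; omega) xs h)
  · intro j hj hlt'
    simp only [decide_eq_true_eq]
    exact hlt j hj hlt'
  · intro j hj hge'
    have := hge j hj hge'
    simp only [decide_eq_true_eq]
    omega

lemma pv_countP_split (xs : List Int) (x : Int) :
    xs.countP (fun y => decide (y ≤ x)) = xs.countP (fun y => decide (y < x)) + xs.count x := by
  induction xs with
  | nil => simp
  | cons a t ih =>
    simp only [List.countP_cons, List.count_cons, ih, beq_iff_eq]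
    split_ifs <;> simp_all <;> omega

lemma pv_bisect_diff (xs : List Int) (x : Int) (h : xs.Pairwise (· ≤ ·)) :
    (PySem.List.bisectRight xs x : ℤ) - (PySem.List.bisectLeft xs x : ℤ) = (xs.count x : ℤ) := by
  rw [pv_bisectLeft xs x h, pv_bisectRight xs x h, pv_countP_split xs x]
  push_cast
  ring

lemma pv_sum_map_range (n : ℕ) (g : ℕ → ℤ) :
    ((List.range n).map g).sum = ∑ i ∈ Finset.range n, g i := by
  induction n with
  | zero => simp
  | succ m ih => rw [List.range_succ, Finset.sum_range_succ]; simp [ih]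

lemma pv_sum_map_pyRange (a b : ℤ) (ha : 0 ≤ a) (g : ℤ → ℤ) :
    ((PySem.List.pyRange a b 1).map g).sum = ∑ u ∈ Finset.Ico a.toNat b.toNat, g (u : ℤ) := by
  rw [PySem.List.pyRange_one, List.map_map, pv_sum_map_range, Finset.sum_Ico_eq_sum_range]
  rw [show b.toNat - a.toNat = (b - a).toNat by omega]
  refine Finset.sum_congr rfl (fun k _ => ?_)
  simp only [Function.comp_apply]
  congr 1
  omega
lemma pvOuter (l : List Int) (nz : ℤ) (hnz : 0 ≤ nz) :
    ∀ (k : ℕ) (m : ℤ) (d : PySem.Dict Int Int) (t : ℤ),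
      (m - nz).toNat = k → m + 2 ≤ (l.length : ℤ) →
      (∀ v, d.getD v 0 = ((l.drop (m + 2).toNat).count v : ℤ)) →
      ((PySem.List.pyRange m nz (-1)).foldl
        (fun (st : PySem.Dict Int Int × Int) j =>
          let cnt := st.1.insert (PySem.List.pyGetD l (j + 1) 0)
                                 (st.1.getD (PySem.List.pyGetD l (j + 1) 0) 0 + 1)
          let aj := PySem.List.pyGetD l j 0
          let total := (PySem.List.pyRange nz j 1).foldl
            (fun total i => total + cnt.getD (PySem.List.pyGetD l i 0 * aj) 0) st.2
          (cnt, total)) (d, t)).2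
        = t + ((PySem.List.pyRange m nz (-1)).map
            (fun j => ((PySem.List.pyRange nz j 1).map (fun i => pvF l i j)).sum)).sum := by
  intro k
  induction k with
  | zero =>
    intro m d t hk _ _
    rw [PySem.List.pyRange_neg_one_eq_nil (by omega)]
    simp
  | succ k ih =>
    intro m d t hk hmlen hd
    have hm : nz < m := by omega
    rw [PySem.List.pyRange_neg_one_cons hm]
    simp only [List.foldl_cons, List.map_cons, List.sum_cons]
    have hm1 : (m + 1).toNat < l.length := by omega
    have hkey : PySem.List.pyGetD l (m + 1) 0 = l[(m + 1).toNat] :=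
      PySem.List.pyGetD_eq_getElem l 0 (by omega) (by omega)
    have hcnt : ∀ v, (d.insert (PySem.List.pyGetD l (m + 1) 0)
        (d.getD (PySem.List.pyGetD l (m + 1) 0) 0 + 1)).getD v 0
        = ((l.drop (m + 1).toNat).count v : ℤ) := by
      intro v
      rw [PySem.Dict.getD_insert, List.drop_eq_getElem_cons hm1, hkey,
        show (m + 1).toNat + 1 = (m + 2).toNat by omega, List.count_cons]
      by_cases hv : v = l[(m + 1).toNat]
      · simp [hv, hd]
      · simp [hv, Ne.symm hv, hd]
    rw [ih (m - 1) _ _ (by omega) (by omega)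
      (by intro v; rw [show m - 1 + 2 = m + 1 by ring]; exact hcnt v)]
    rw [PySem.List.foldl_add]
    rw [List.map_congr_left (g := fun i => pvF l i m) (fun i _ => by
      simp only [pvF]
      rw [hcnt (PySem.List.pyGetD l i 0 * PySem.List.pyGetD l m 0)])]
    ring

lemma pv_swap (F : ℕ → ℕ → ℤ) (c N1 N2 : ℕ) (h21 : N2 ≤ N1) (h12 : N1 ≤ N2 + 1) :
    ∑ i ∈ Finset.Ico c N2, ∑ j ∈ Finset.Ico (i + 1) N1, F i j
      = ∑ j ∈ Finset.Ico (c + 1) N1, ∑ i ∈ Finset.Ico c j, F i j := by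
  have h1 : (∑ i ∈ Finset.Ico c N2, ∑ j ∈ Finset.Ico (i + 1) N1, F i j)
      = ∑ i ∈ Finset.Ico c N1, ∑ j ∈ Finset.Ico (i + 1) N1, F i j :=
    Finset.sum_subset (Finset.Ico_subset_Ico le_rfl h21) (by
      intro i hi hni
      simp only [Finset.mem_Ico] at hi hni
      rw [Finset.Ico_eq_empty (by omega), Finset.sum_empty])
  have h2 : (∑ j ∈ Finset.Ico (c + 1) N1, ∑ i ∈ Finset.Ico c j, F i j)
      = ∑ j ∈ Finset.Ico c N1, ∑ i ∈ Finset.Ico c j, F i j :=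
    Finset.sum_subset (Finset.Ico_subset_Ico (by omega) le_rfl) (by
      intro j hj hnj
      simp only [Finset.mem_Ico] at hj hnj
      rw [show j = c by omega, Finset.Ico_self, Finset.sum_empty])
  rw [h1, h2, Finset.sum_Ico_Ico_comm']

lemma pv_solveB (A : List Int) :
    solve_alt A = pvBase A
      + ∑ v ∈ Finset.Ico (pvC A + 1) (((A.length : ℤ) - 1).toNat),
          ∑ u ∈ Finset.Ico (pvC A) v, pvF (pvL A) (u : ℤ) (v : ℤ) := by
  have hs : (PySem.List.sorted A (fun x => x)).Pairwise (· ≤ ·) :=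
    PySem.List.sorted_pairwise A (fun x => x)
  have hlen : (PySem.List.sorted A (fun x => x)).length = A.length :=
    PySem.List.length_sorted A (fun x => x) false
  simp only [solve_alt, pvBase, pvC, pvL, PySem.List.len_eq, hlen,
    PySem.List.foldl_ite_add_one, zero_add]
  rw [pvOuter (PySem.List.sorted A (fun x => x))
      ((List.countP (fun x => decide (x ≤ 0)) (PySem.List.sorted A fun x => x) : ℕ) : ℤ)
      (by positivity)
      (((A.length : ℤ) - 2 - (List.countP (fun x => decide (x ≤ 0)) (PySem.List.sorted A fun x => x) : ℕ)).toNat)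
      ((A.length : ℤ) - 2) PySem.Dict.empty _ rfl (by omega)
      (by
        intro v
        rw [PySem.Dict.getD_empty, show ((A.length : ℤ) - 2 + 2).toNat
            = (PySem.List.sorted A fun x => x).length by omega,
          List.drop_length]
        simp)]
  rw [PySem.List.pyRange_neg_one_eq_reverse, List.map_reverse, List.sum_reverse,
    show ((A.length : ℤ) - 2 + 1) = (A.length : ℤ) - 1 by ring,
    pv_sum_map_pyRange _ _ (by positivity),
    show (((List.countP (fun x => decide (x ≤ 0)) (PySem.List.sorted A fun x => x) : ℕ) : ℤ) + 1).toNat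
      = List.countP (fun x => decide (x ≤ 0)) (PySem.List.sorted A fun x => x) + 1 by omega]
  congr 1
  refine Finset.sum_congr rfl (fun v _ => ?_)
  rw [pv_sum_map_pyRange _ _ (by positivity)]
  simp

lemma pv_solveA (A : List Int) :
    solve A = pvBase A
      + ∑ u ∈ Finset.Ico (pvC A) (((A.length : ℤ) - 2).toNat),
          ∑ v ∈ Finset.Ico (u + 1) (((A.length : ℤ) - 1).toNat), pvF (pvL A) (u : ℤ) (v : ℤ) := by
  have hs : (PySem.List.sorted A (fun x => x)).Pairwise (· ≤ ·) :=
    PySem.List.sorted_pairwise A (fun x => x)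
  have hlen : (PySem.List.sorted A (fun x => x)).length = A.length :=
    PySem.List.length_sorted A (fun x => x) false
  have hbr : PySem.List.bisectRight (PySem.List.sorted A (fun x => x)) 0
      = List.countP (fun y => decide (y ≤ 0)) (PySem.List.sorted A fun x => x) :=
    pv_bisectRight _ 0 hs
  simp only [solve, foo2, foo3, pvBase, pvC, pvL, PySem.List.len_eq, hlen, hbr,
    show ((2 * 3 : ℤ)) = 6 by norm_num, PySem.List.foldl_add]
  rw [pv_sum_map_pyRange _ _ (by positivity)]
  simp only [Int.toNat_natCast]
  congr 1
  refine Finset.sum_congr rfl (fun u _ => ?_)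
  rw [pv_sum_map_pyRange _ _ (by positivity),
    show (((u : ℕ) : ℤ) + 1).toNat = u + 1 by omega]
  refine Finset.sum_congr rfl (fun v _ => ?_)
  simp only [pvF]
  rw [← pv_bisect_diff _ _ (hs.drop)]
  ring

-- ===== VERDICT (by name: the statement is the Claim_ definition above) =====
theorem solve_spec : Claim_equal_solve := by
  unfold Claim_equal_solve
  intro A _
  unfold Spec_solve
  rw [pv_solveA, pv_solveB,
    pv_swap (fun u v => pvF (pvL A) (u : ℤ) (v : ℤ)) (pvC A)
      (((A.length : ℤ) - 1).toNat) (((A.length : ℤ) - 2).toNat) (by omega) (by omega)]
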